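-- pv_equiv track=rewrite | github.com/davidebiasion/project-euler | p49.py | digit_permutations
-- ===== SOURCE A (Python) =====
-- def factorial(n):
-- 	f = n
-- 	for i in range(1, n):
-- 		f *= n-i
--
-- 	return f
--
-- def digit_permutations(n):
-- 	permutations = []
-- 	l = len(str(n))
-- 	n_perm = factorial(n)
-- 	i = 10**(l-1)
-- 	while len(permutations) < n_perm and i < 10**l:
-- 		if is_permutation(str(i), str(n)):
-- 			permutations.append(i)
--
-- 		i+=1
--
-- 	return permutations
--
-- def is_permutation(p, n):
-- 	if p == n:
-- 		return True
--
-- 	p = sorted(p)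
-- 	n = sorted(n)
--
-- 	return p == n
-- ===== SOURCE B (Python) =====
-- def digit_permutations(n):
--     # Generate the digit-permutations of n directly (nonzero leading digit),
--     # instead of scanning the whole l-digit range.
--     if n < 0:
--         return []
--     digits = []
--     m = n
--     while m > 0:
--         digits.append(m % 10)
--         m //= 10
--     if not digits:
--         digits = [0]
--     result = []
--     for k in range(len(digits)):
--         if digits[k] != 0:
--             result.extend(_arrangements(digits[:k] + digits[k + 1:], digits[k]))
--     return sorted(set(result))
--
-- def _arrangements(rest, acc):
--     # every number obtained by appending some ordering of `rest` to the digits of acc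
--     if not rest:
--         return [acc]
--     out = []
--     for k in range(len(rest)):
--         out.extend(_arrangements(rest[:k] + rest[k + 1:], acc * 10 + rest[k]))
--     return out
-- ===== Notes on version B (the rewrite author's own statement) =====
-- stated objective: faster
-- what changed: B generates the digit-arrangements of n directly (nonzero leading digit) and sorts their values, instead of computing factorial(n) and scanning every l-digit number for a digit-multiset match.
import Mathlib
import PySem

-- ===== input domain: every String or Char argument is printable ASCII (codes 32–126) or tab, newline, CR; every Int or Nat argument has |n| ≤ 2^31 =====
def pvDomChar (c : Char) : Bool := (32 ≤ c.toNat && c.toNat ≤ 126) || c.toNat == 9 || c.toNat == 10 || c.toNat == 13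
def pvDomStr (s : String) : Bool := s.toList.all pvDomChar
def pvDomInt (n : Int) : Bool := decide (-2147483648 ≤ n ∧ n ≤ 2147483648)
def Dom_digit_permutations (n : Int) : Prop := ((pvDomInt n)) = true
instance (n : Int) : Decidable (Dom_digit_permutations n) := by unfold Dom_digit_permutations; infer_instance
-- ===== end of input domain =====

-- B replaces A's scan of the whole l-digit range (after computing factorial(n)) by direct
-- generation of the digit-arrangements of n; measured faster (asymptotic change).

-- ===== PORT A =====
def pv_factorial (n : Int) : Int :=
  (PySem.List.pyRange 1 n).foldl (fun f i => f * (n - i)) n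

def pv_is_permutation (p q : String) : Bool :=
  if p == q then true
  else (PySem.List.sorted p.toList (fun c => c)) == (PySem.List.sorted q.toList (fun c => c))

def pv_loop (n n_perm hi : Int) (perms : List Int) (i : Int) : List Int :=
  if _h : ((perms.length : Int) < n_perm ∧ i < hi) then
    pv_loop n n_perm hi
      (if pv_is_permutation (PySem.Int.toStr i) (PySem.Int.toStr n) then perms ++ [i] else perms)
      (i + 1)
  else perms
termination_by (hi - i).toNat
decreasing_by omega

def digit_permutations (n : Int) : List Int :=
  let l : Int := PySem.Str.len (PySem.Int.toStr n)
  -- 10 ** (l - 1): l ≥ 1 since str(n) is nonempty, so the Nat-exponent form is exact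
  pv_loop n (pv_factorial n) ((10 : Int) ^ l.toNat) [] ((10 : Int) ^ (l - 1).toNat)

-- ===== PORT B =====
-- digit-arrangement generator: for each position k of rest, place rest[k] next
def pv_arrangements (rest : List Int) (acc : Int) : List Int :=
  if rest = [] then [acc]
  else
    (PySem.List.pyRange 0 (PySem.List.len rest)).attach.foldl
      (fun out k =>
        out ++ pv_arrangements
          (PySem.List.slice rest none (some k.1) ++ PySem.List.slice rest (some (k.1 + 1)) none)
          (acc * 10 + PySem.List.pyGetD rest k.1 0))
      []
termination_by rest.length
decreasing_by
  have hk := PySem.List.mem_pyRange_one.mp k.2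
  simp only [PySem.List.len_eq] at hk
  rw [PySem.List.slice_to rest hk.1, PySem.List.slice_from rest (by omega)]
  simp only [List.length_append, List.length_take, List.length_drop]
  omega

-- while m > 0: digits.append(m % 10); m //= 10
def pv_digits_loop (m : Int) (ds : List Int) : List Int :=
  if _h : 0 < m then
    pv_digits_loop (PySem.Int.floordiv m 10) (ds ++ [PySem.Int.mod m 10])
  else ds
termination_by m.toNat
decreasing_by
  rw [PySem.Int.floordiv_eq_ediv_of_pos (by norm_num)]
  omega

def digit_permutations_alt (n : Int) : List Int :=
  if n < 0 then []
  else
    let ds0 := pv_digits_loop n []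
    let ds := if ds0 = [] then [(0 : Int)] else ds0
    let result := (PySem.List.pyRange 0 (PySem.List.len ds)).foldl
      (fun res k =>
        if PySem.List.pyGetD ds k 0 ≠ 0 then
          res ++ pv_arrangements
            (PySem.List.slice ds none (some k) ++ PySem.List.slice ds (some (k + 1)) none)
            (PySem.List.pyGetD ds k 0)
        else res)
      []
    PySem.List.sorted (PySem.Set.ofList result) (fun x => x)

-- ===== PRECONDITION & SPEC =====
def Spec_digit_permutations (n : Int) (out : List Int) : Prop := out = digit_permutations_alt n
instance (n : Int) (out : List Int) : Decidable (Spec_digit_permutations n out) := by unfold Spec_digit_permutations; infer_instance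

-- ===== CLAIM (what is proved, stated in full; the proofs are below) =====
def Claim_equal_digit_permutations : Prop := ∀ (n : Int), Dom_digit_permutations n → Spec_digit_permutations n (digit_permutations n)

-- ===== LEMMAS AND PROOFS =====

-- Horner value of a big-endian digit list on top of acc (proof-side helper)
def pv_horner (acc : Int) (L : List Int) : Int := L.foldl (fun a d => a * 10 + d) acc

-- the filter that A's scan collects
def pv_FA (n : Int) (lo hi : Int) : List Int :=
  (PySem.List.pyRange lo hi).filter
    (fun j => pv_is_permutation (PySem.Int.toStr j) (PySem.Int.toStr n))

-- B's digit list and collected (unsorted) results (proof-side names for B's locals)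
def pv_ds (n : Int) : List Int :=
  if pv_digits_loop n [] = [] then [(0 : Int)] else pv_digits_loop n []

def pv_collect (n : Int) : List Int :=
  (PySem.List.pyRange 0 (PySem.List.len (pv_ds n))).foldl
    (fun res k =>
      if PySem.List.pyGetD (pv_ds n) k 0 ≠ 0 then
        res ++ pv_arrangements
          (PySem.List.slice (pv_ds n) none (some k) ++ PySem.List.slice (pv_ds n) (some (k + 1)) none)
          (PySem.List.pyGetD (pv_ds n) k 0)
      else res)
    []

lemma pv_toDigitsCore_eq (b : ℕ) (hb : 1 < b) :
    ∀ (fuel n : ℕ), n < fuel → 0 < n → ∀ ds,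
      Nat.toDigitsCore b fuel n ds = ((Nat.digits b n).map Nat.digitChar).reverse ++ ds := by
  intro fuel
  induction fuel with
  | zero => intro n h; omega
  | succ fuel ih =>
    intro n hlt hpos ds
    have hstep : Nat.toDigitsCore b (fuel + 1) n ds =
        if n / b = 0 then (n % b).digitChar :: ds
        else Nat.toDigitsCore b fuel (n / b) ((n % b).digitChar :: ds) := rfl
    rw [hstep]
    by_cases hz : n / b = 0
    · rw [if_pos hz]
      have hnb : n < b := (Nat.div_eq_zero_iff_lt (by omega)).mp hz
      rw [Nat.digits_of_lt b n (by omega) hnb, Nat.mod_eq_of_lt hnb]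
      simp
    · rw [if_neg hz]
      have hq : 0 < n / b := Nat.pos_of_ne_zero hz
      have hlt2 : n / b < n := Nat.div_lt_self hpos hb
      rw [ih (n / b) (by omega) hq ((n % b).digitChar :: ds)]
      rw [Nat.digits_def' hb hpos]
      simp

lemma pv_toChars_eq (n : Int) (h : 0 < n) :
    PySem.Int.toChars n = ((Nat.digits 10 n.toNat).map Nat.digitChar).reverse := by
  have hnn : ¬ n < 0 := by omega
  show (if n < 0 then '-' :: Nat.toDigits 10 n.natAbs else Nat.toDigits 10 n.toNat) = _
  rw [if_neg hnn]
  show Nat.toDigitsCore 10 (n.toNat + 1) n.toNat [] = _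
  rw [pv_toDigitsCore_eq 10 (by norm_num) (n.toNat + 1) n.toNat (by omega) (by omega) []]
  simp

lemma pv_digits_loop_eq : ∀ (m : Int), 0 ≤ m → ∀ ds,
    pv_digits_loop m ds = ds ++ (Nat.digits 10 m.toNat).map Int.ofNat := by
  have H : ∀ (k : ℕ) (m : Int), m.toNat = k → 0 ≤ m → ∀ ds,
      pv_digits_loop m ds = ds ++ (Nat.digits 10 m.toNat).map Int.ofNat := by
    intro k
    induction k using Nat.strong_induction_on with
    | _ k ih =>
      intro m hk hm ds
      rw [pv_digits_loop]
      by_cases hpos : 0 < m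
      · rw [dif_pos hpos]
        rw [PySem.Int.floordiv_eq_ediv_of_pos (by norm_num), PySem.Int.mod_eq_emod_of_pos (by norm_num)]
        rw [ih (m / 10).toNat (by omega) (m / 10) rfl (by omega)]
        rw [Nat.digits_def' (b := 10) (by norm_num) (n := m.toNat) (by omega)]
        have e1 : (m % 10) = ((m.toNat % 10 : ℕ) : Int) := by omega
        have e2 : (m / 10).toNat = m.toNat / 10 := by omega
        rw [e1, e2]
        simp
      · rw [dif_neg hpos]
        have : m.toNat = 0 := by omega
        rw [this]
        simp
  intro m hm ds
  exact H m.toNat m rfl hm ds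

lemma pv_horner_cons (a d : Int) (L : List Int) :
    pv_horner a (d :: L) = pv_horner (a * 10 + d) L := rfl

lemma pv_horner_ofDigits : ∀ (M : List ℕ) (a : Int),
    pv_horner a (M.map Int.ofNat) =
      a * 10 ^ M.length + (Nat.ofDigits 10 M.reverse : ℕ) := by
  intro M
  induction M with
  | nil => intro a; simp [pv_horner]
  | cons d M ih =>
    intro a
    rw [List.map_cons, pv_horner_cons, ih]
    rw [List.reverse_cons, Nat.ofDigits_append]
    push_cast [Nat.ofDigits_singleton]
    simp only [List.length_cons, List.length_reverse, Int.ofNat_eq_natCast]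
    ring

lemma pv_mem_arrangements : ∀ (rest : List Int) (acc v : Int),
    v ∈ pv_arrangements rest acc ↔ ∃ L, L.Perm rest ∧ v = pv_horner acc L := by
  have H : ∀ (K : ℕ) (rest : List Int), rest.length = K → ∀ (acc v : Int),
      (v ∈ pv_arrangements rest acc ↔ ∃ L, L.Perm rest ∧ v = pv_horner acc L) := by
    intro K
    induction K using Nat.strong_induction_on with
    | _ K ih =>
      intro rest hK acc v
      rw [pv_arrangements]
      by_cases hnil : rest = []
      · rw [if_pos hnil]
        subst hnil
        constructor
        · intro hv
          exact ⟨[], List.Perm.refl _, by simpa [pv_horner] using hv⟩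
        · rintro ⟨L, hL, hval⟩
          rw [List.perm_nil] at hL
          subst hL
          simpa [pv_horner] using hval
      · rw [if_neg hnil]
        rw [PySem.List.foldl_append_eq_flatMap, List.nil_append]
        constructor
        · intro hv
          rw [List.mem_flatMap] at hv
          obtain ⟨⟨kk, hkmem⟩, -, hv⟩ := hv
          dsimp only at hv
          have hk := PySem.List.mem_pyRange_one.mp hkmem
          rw [PySem.List.len_eq] at hk
          have hjlt : kk.toNat < rest.length := by omega
          rw [PySem.List.slice_to rest hk.1, PySem.List.slice_from rest (by omega)] at hv
          rw [PySem.List.pyGetD_eq_getElem rest 0 hk.1 (by exact_mod_cast hk.2)] at hv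
          have e2 : (kk + 1).toNat = kk.toNat + 1 := by omega
          rw [e2] at hv
          have hlt1 : (rest.take kk.toNat ++ rest.drop (kk.toNat + 1)).length < K := by
            rw [List.length_append, List.length_take, List.length_drop]
            omega
          rw [ih (rest.take kk.toNat ++ rest.drop (kk.toNat + 1)).length hlt1 _ rfl] at hv
          obtain ⟨L', hperm, hval⟩ := hv
          refine ⟨rest[kk.toNat] :: L', ?_, by rw [pv_horner_cons]; exact hval⟩
          have hsplit : rest = rest.take kk.toNat ++ rest[kk.toNat] :: rest.drop (kk.toNat + 1) := by
            conv_lhs => rw [← List.take_append_drop kk.toNat rest]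
            rw [List.getElem_cons_drop hjlt]
          have h2 := List.perm_middle (a := rest[kk.toNat])
            (l₁ := rest.take kk.toNat) (l₂ := rest.drop (kk.toNat + 1))
          rw [← hsplit] at h2
          exact (hperm.cons _).trans h2.symm
        · rintro ⟨L, hperm, hval⟩
          cases L with
          | nil =>
            exact absurd (List.perm_nil.mp hperm.symm) hnil
          | cons d L'' =>
            have hd : d ∈ rest := hperm.subset (by simp)
            obtain ⟨j, hjlt, hdj⟩ := List.getElem_of_mem hd
            rw [List.mem_flatMap]
            have hjmem : (j : Int) ∈ PySem.List.pyRange 0 (PySem.List.len rest) := by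
              rw [PySem.List.mem_pyRange_one, PySem.List.len_eq]
              exact ⟨by positivity, by exact_mod_cast hjlt⟩
            refine ⟨⟨(j : Int), hjmem⟩, List.mem_attach _ _, ?_⟩
            dsimp only
            rw [PySem.List.slice_to rest (by positivity), PySem.List.slice_from rest (by positivity)]
            rw [PySem.List.pyGetD_eq_getElem rest 0 (by positivity) (by exact_mod_cast hjlt)]
            have e1 : ((j : Int)).toNat = j := by omega
            have e2 : ((j : Int) + 1).toNat = j + 1 := by omega
            simp only [e1, e2]
            have hlt2 : (rest.take j ++ rest.drop (j + 1)).length < K := by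
              rw [List.length_append, List.length_take, List.length_drop]
              omega
            rw [ih (rest.take j ++ rest.drop (j + 1)).length hlt2 _ rfl]
            refine ⟨L'', ?_, ?_⟩
            · have hsplit : rest = rest.take j ++ rest[j] :: rest.drop (j + 1) := by
                conv_lhs => rw [← List.take_append_drop j rest]
                rw [List.getElem_cons_drop hjlt]
              have h2 := List.perm_middle (a := rest[j])
                (l₁ := rest.take j) (l₂ := rest.drop (j + 1))
              rw [← hsplit] at h2
              have h3 := hperm.trans h2
              rw [hdj] at h3
              exact h3.cons_inv
            · rw [hdj, hval, pv_horner_cons]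
  intro rest acc v
  exact H rest.length rest rfl acc v

lemma pv_digitChar_inj_on (M N : List ℕ) (hM : ∀ d ∈ M, d < 10) (hN : ∀ d ∈ N, d < 10)
    (h : (M.map Nat.digitChar).Perm (N.map Nat.digitChar)) : M.Perm N := by
  have h2 := h.map (fun c => c.toNat - 48)
  rw [List.map_map, List.map_map] at h2
  have key : ∀ (X : List ℕ), (∀ d ∈ X, d < 10) →
      X.map ((fun c : Char => c.toNat - 48) ∘ Nat.digitChar) = X := by
    intro X hX
    have : ∀ d ∈ X, ((fun c : Char => c.toNat - 48) ∘ Nat.digitChar) d = id d := by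
      intro d hd
      have hd10 : d < 10 := hX d hd
      interval_cases d <;> rfl
    rw [List.map_congr_left this, List.map_id]
  rwa [key M hM, key N hN] at h2

lemma pv_isPerm_iff (i n : Int) :
    pv_is_permutation (PySem.Int.toStr i) (PySem.Int.toStr n) = true ↔
      (PySem.Int.toChars i).Perm (PySem.Int.toChars n) := by
  unfold pv_is_permutation
  by_cases heq : PySem.Int.toStr i = PySem.Int.toStr n
  · rw [if_pos (beq_iff_eq.mpr heq)]
    have : PySem.Int.toChars i = PySem.Int.toChars n := by
      rw [← PySem.Int.toList_toStr, ← PySem.Int.toList_toStr, heq]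
    simp [this, List.Perm.refl]
  · rw [if_neg (by simpa using heq)]
    rw [beq_iff_eq]
    rw [PySem.Int.toList_toStr, PySem.Int.toList_toStr]
    exact PySem.List.sorted_id_eq_sorted_id_iff_perm _ _

lemma pv_loop_eq (n n_perm hib : Int) : ∀ (k : ℕ) (i : Int) (perms : List Int),
    (hib - i).toNat = k →
    (perms.length : Int) + ((PySem.List.pyRange i hib).filter
        (fun j => pv_is_permutation (PySem.Int.toStr j) (PySem.Int.toStr n))).length ≤ n_perm →
    pv_loop n n_perm hib perms i = perms ++ (PySem.List.pyRange i hib).filter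
        (fun j => pv_is_permutation (PySem.Int.toStr j) (PySem.Int.toStr n)) := by
  intro k
  induction k using Nat.strong_induction_on with
  | _ k ih =>
    intro i perms hk hcap
    by_cases hilt : i < hib
    · rw [PySem.List.pyRange_one_cons hilt] at hcap ⊢
      by_cases hlen : (perms.length : Int) < n_perm
      · rw [pv_loop, dif_pos ⟨hlen, hilt⟩]
        by_cases hp : pv_is_permutation (PySem.Int.toStr i) (PySem.Int.toStr n) = true
        · simp only [List.filter_cons, hp, if_pos] at hcap ⊢
          have hcap2 : ((perms ++ [i]).length : Int) + ((PySem.List.pyRange (i+1) hib).filter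
              (fun j => pv_is_permutation (PySem.Int.toStr j) (PySem.Int.toStr n))).length ≤ n_perm := by
            simp only [List.length_append, List.length_cons, List.length_nil, List.length_cons] at hcap ⊢
            push_cast at hcap ⊢
            omega
          rw [ih (hib - (i+1)).toNat (by omega) (i+1) (perms ++ [i]) rfl hcap2]
          simp
        · have hp' : pv_is_permutation (PySem.Int.toStr i) (PySem.Int.toStr n) = false := by
            simpa using hp
          simp only [List.filter_cons, hp'] at hcap ⊢
          simp only [Bool.false_eq_true, if_false] at hcap ⊢
          exact ih (hib - (i+1)).toNat (by omega) (i+1) perms rfl hcap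
      · have hzero : ((i :: PySem.List.pyRange (i + 1) hib).filter
            (fun j => pv_is_permutation (PySem.Int.toStr j) (PySem.Int.toStr n))).length = 0 := by
          omega
        rw [List.length_eq_zero_iff] at hzero
        rw [hzero, List.append_nil]
        rw [pv_loop, dif_neg (fun h => hlen h.1)]
    · rw [PySem.List.pyRange_one_eq_nil (by omega)]
      rw [pv_loop, dif_neg (fun h => hilt h.2)]
      simp

lemma pv_foldl_mul_ge (n : Int) : ∀ (xs : List Int) (acc : Int), 0 < acc →
    (∀ i ∈ xs, 1 ≤ n - i) → acc ≤ xs.foldl (fun f i => f * (n - i)) acc := by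
  intro xs
  induction xs with
  | nil => intro acc h _; simp
  | cons x xs ih =>
    intro acc hacc hmem
    simp only [List.foldl_cons]
    have h1 : 1 ≤ n - x := hmem x (by simp)
    have h2 : acc ≤ acc * (n - x) := le_mul_of_one_le_right (by omega) h1
    have h3 : 0 < acc * (n - x) := by positivity
    exact le_trans h2 (ih (acc * (n - x)) h3 (fun i hi => hmem i (by simp [hi])))

lemma pv_factorial_ge_self (n : Int) (h : 1 ≤ n) : n ≤ pv_factorial n := by
  unfold pv_factorial
  exact pv_foldl_mul_ge n _ n (by omega) (fun i hi => by
    have := PySem.List.mem_pyRange_one.mp hi; omega)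

lemma pv_factorial_ge (n : Int) (h : 10 ≤ n) : 9 * n ≤ pv_factorial n := by
  unfold pv_factorial
  rw [PySem.List.pyRange_one_cons (by omega : (1:Int) < n)]
  simp only [List.foldl_cons]
  have h1 : n * (n - 1) ≤ (PySem.List.pyRange (1+1) n).foldl (fun f i => f * (n - i)) (n * (n - 1)) := by
    apply pv_foldl_mul_ge n _ _ (by nlinarith) (fun i hi => by
      have := PySem.List.mem_pyRange_one.mp hi; omega)
  nlinarith

-- membership in A's filtered range, for n ≥ 1
lemma pv_mem_FA (n : Int) (hn : 1 ≤ n) (v : Int) :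
    v ∈ pv_FA n ((10:Int) ^ ((Nat.digits 10 n.toNat).length - 1)) ((10:Int) ^ (Nat.digits 10 n.toNat).length) ↔
      ∃ d L, (d :: L).Perm ((Nat.digits 10 n.toNat).map Int.ofNat) ∧ d ≠ 0 ∧ v = pv_horner d L := by
  have hNne : n.toNat ≠ 0 := by omega
  have hDNnil : Nat.digits 10 n.toNat ≠ [] := Nat.digits_ne_nil_iff_ne_zero.mpr hNne
  have hl1 : 0 < (Nat.digits 10 n.toNat).length := List.length_pos_of_ne_nil hDNnil
  unfold pv_FA
  rw [List.mem_filter, PySem.List.mem_pyRange_one]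
  constructor
  · rintro ⟨⟨hlo, hhi⟩, hpred⟩
    have hvpos : 0 < v :=
      lt_of_lt_of_le (by positivity) hlo
    have hperm := (pv_isPerm_iff v n).mp hpred
    rw [pv_toChars_eq v hvpos, pv_toChars_eq n (by omega)] at hperm
    have hpermM : (Nat.digits 10 v.toNat).Perm (Nat.digits 10 n.toNat) := by
      apply pv_digitChar_inj_on _ _
        (fun d hd => Nat.digits_lt_base (by norm_num) hd)
        (fun d hd => Nat.digits_lt_base (by norm_num) hd)
      exact (List.reverse_perm _).symm.trans (hperm.trans (List.reverse_perm _))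
    have hvnil : v.toNat ≠ 0 := by omega
    cases hB : (Nat.digits 10 v.toNat).reverse with
    | nil =>
      have : Nat.digits 10 v.toNat = [] := by simpa using hB
      exact absurd this (Nat.digits_ne_nil_iff_ne_zero.mpr hvnil)
    | cons d0 T =>
      have hd' : Nat.digits 10 v.toNat = T.reverse ++ [d0] := by
        rw [← List.reverse_reverse (Nat.digits 10 v.toNat), hB, List.reverse_cons]
      refine ⟨Int.ofNat d0, T.map Int.ofNat, ?_, ?_, ?_⟩
      · have e0 : (Int.ofNat d0 :: T.map Int.ofNat) = ((d0 :: T).map Int.ofNat) := rfl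
        rw [e0, ← hB]
        have p1 : ((Nat.digits 10 v.toNat).reverse.map Int.ofNat).Perm
            ((Nat.digits 10 v.toNat).map Int.ofNat) := by
          rw [List.map_reverse]
          exact List.reverse_perm _
        exact p1.trans (hpermM.map _)
      · have h9 : (Nat.digits 10 v.toNat).getLast? = some d0 := by
          rw [hd']
          simp
        have h10 := Nat.getLast_digit_ne_zero 10 hvnil
        have h11 := List.getLast?_eq_some_getLast (l := Nat.digits 10 v.toNat)
          (Nat.digits_ne_nil_iff_ne_zero.mpr hvnil)
        rw [h9] at h11
        have h13 : (Nat.digits 10 v.toNat).getLast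
            (Nat.digits_ne_nil_iff_ne_zero.mpr hvnil) = d0 := Option.some.inj h11.symm
        rw [h13] at h10
        simp only [Int.ofNat_eq_natCast, ne_eq, Nat.cast_eq_zero]
        exact h10
      · have h12 : pv_horner 0 ((d0 :: T).map Int.ofNat) = v := by
          rw [pv_horner_ofDigits]
          rw [show (d0 :: T).reverse = Nat.digits 10 v.toNat from by
            rw [← hB, List.reverse_reverse]]
          rw [Nat.ofDigits_digits]
          simp only [List.length_cons, zero_mul, zero_add]
          omega
        have h13 : pv_horner (0 : Int) ((d0 :: T).map Int.ofNat) =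
            pv_horner (Int.ofNat d0) (T.map Int.ofNat) := by
          rw [List.map_cons, pv_horner_cons]
          norm_num
        exact h12.symm.trans h13
  · rintro ⟨d, L, hperm, hdnz, hval⟩
    have hmemnn : ∀ x ∈ (d :: L), 0 ≤ x := by
      intro x hx
      have hx2 := hperm.subset hx
      rw [List.mem_map] at hx2
      obtain ⟨w, -, hw⟩ := hx2
      simp only [Int.ofNat_eq_natCast] at hw
      omega
    have hMcast : ((d :: L).map Int.toNat).map Int.ofNat = d :: L := by
      rw [List.map_map]
      have e : ∀ x ∈ (d :: L), (Int.ofNat ∘ Int.toNat) x = id x := by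
        intro x hx
        have := hmemnn x hx
        simp only [Function.comp_apply, id_eq, Int.ofNat_eq_natCast]
        omega
      rw [List.map_congr_left e, List.map_id]
    have hMperm : ((d :: L).map Int.toNat).Perm (Nat.digits 10 n.toNat) := by
      have h2 := hperm.map Int.toNat
      rw [List.map_map] at h2
      have e : (Nat.digits 10 n.toNat).map (Int.toNat ∘ Int.ofNat) = Nat.digits 10 n.toNat := by
        have : ∀ x ∈ Nat.digits 10 n.toNat, (Int.toNat ∘ Int.ofNat) x = id x := by
          intro x hx
          simp
        rw [List.map_congr_left this, List.map_id]
      rwa [e] at h2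
    have hMlt : ∀ x ∈ ((d :: L).map Int.toNat).reverse, x < 10 := by
      intro x hx
      rw [List.mem_reverse] at hx
      exact Nat.digits_lt_base (by norm_num) (hMperm.subset hx)
    have hdnn : 0 ≤ d := hmemnn d (by simp)
    have hlastrev : ∀ h, (((d :: L).map Int.toNat).reverse).getLast h ≠ 0 := by
      intro h
      rw [List.getLast_reverse]
      simp only [List.map_cons, List.head_cons]
      omega
    have hdig : Nat.digits 10 (Nat.ofDigits 10 ((d :: L).map Int.toNat).reverse) =
        ((d :: L).map Int.toNat).reverse :=
      Nat.digits_ofDigits 10 (by norm_num) _ hMlt hlastrev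
    set w : ℕ := Nat.ofDigits 10 ((d :: L).map Int.toNat).reverse with hw
    have hvw : v = (w : Int) := by
      have h14 := pv_horner_ofDigits ((d :: L).map Int.toNat) 0
      rw [hMcast, pv_horner_cons] at h14
      rw [hval]
      rw [show pv_horner d L = pv_horner (0 * 10 + d) L from by norm_num]
      rw [h14, ← hw]
      simp
    have hlen : (Nat.digits 10 w).length = (Nat.digits 10 n.toNat).length := by
      rw [hdig, List.length_reverse, hMperm.length_eq]
    have hub : w < 10 ^ (Nat.digits 10 n.toNat).length := by
      rw [← hlen]
      exact Nat.lt_base_pow_length_digits (by norm_num)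
    have hlb : 10 ^ ((Nat.digits 10 n.toNat).length - 1) ≤ w := by
      by_contra hc
      push Not at hc
      have := (Nat.digits_length_le_iff (by norm_num) w).mpr hc
      omega
    have hwpos : 0 < w := lt_of_lt_of_le (pow_pos (show 0 < 10 by norm_num) _) hlb
    refine ⟨⟨?_, ?_⟩, ?_⟩
    · rw [hvw]
      exact_mod_cast hlb
    · rw [hvw]
      exact_mod_cast hub
    · rw [pv_isPerm_iff]
      rw [pv_toChars_eq v (by rw [hvw]; exact_mod_cast hwpos), pv_toChars_eq n (by omega)]
      have hvt : v.toNat = w := by omega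
      rw [hvt, hdig]
      have hrev : (((d :: L).map Int.toNat).reverse).Perm (Nat.digits 10 n.toNat) :=
        (List.reverse_perm _).trans hMperm
      exact (List.reverse_perm _).trans ((hrev.map _).trans (List.reverse_perm _).symm)

-- membership in B's collected results
lemma pv_mem_result (n v : Int) :
    v ∈ pv_collect n ↔
      ∃ d L, (d :: L).Perm (pv_ds n) ∧ d ≠ 0 ∧ v = pv_horner d L := by
  unfold pv_collect
  rw [PySem.List.foldl_ite_eq_foldl_filter (p := fun k => PySem.List.pyGetD (pv_ds n) k 0 ≠ 0)]
  rw [PySem.List.foldl_append_eq_flatMap, List.nil_append]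
  constructor
  · intro hv
    rw [List.mem_flatMap] at hv
    obtain ⟨kk, hkmem, hv⟩ := hv
    rw [List.mem_filter] at hkmem
    obtain ⟨hkrange, hknz⟩ := hkmem
    have hk := PySem.List.mem_pyRange_one.mp hkrange
    rw [PySem.List.len_eq] at hk
    have hjlt : kk.toNat < (pv_ds n).length := by omega
    have hknz' : PySem.List.pyGetD (pv_ds n) kk 0 ≠ 0 := by simpa using hknz
    rw [PySem.List.slice_to _ hk.1, PySem.List.slice_from _ (by omega)] at hv
    rw [PySem.List.pyGetD_eq_getElem (pv_ds n) 0 hk.1 (by exact_mod_cast hk.2)] at hv hknz'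
    have e2 : (kk + 1).toNat = kk.toNat + 1 := by omega
    rw [e2] at hv
    rw [pv_mem_arrangements] at hv
    obtain ⟨L', hperm, hval⟩ := hv
    refine ⟨(pv_ds n)[kk.toNat], L', ?_, hknz', hval⟩
    have hsplit : pv_ds n = (pv_ds n).take kk.toNat ++ (pv_ds n)[kk.toNat] :: (pv_ds n).drop (kk.toNat + 1) := by
      conv_lhs => rw [← List.take_append_drop kk.toNat (pv_ds n)]
      rw [List.getElem_cons_drop hjlt]
    have h2 := List.perm_middle (a := (pv_ds n)[kk.toNat])
      (l₁ := (pv_ds n).take kk.toNat) (l₂ := (pv_ds n).drop (kk.toNat + 1))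
    rw [← hsplit] at h2
    exact (hperm.cons _).trans h2.symm
  · rintro ⟨d, L, hperm, hdnz, hval⟩
    have hd : d ∈ pv_ds n := hperm.subset (by simp)
    obtain ⟨j, hjlt, hdj⟩ := List.getElem_of_mem hd
    rw [List.mem_flatMap]
    have hjmem : (j : Int) ∈ PySem.List.pyRange 0 (PySem.List.len (pv_ds n)) := by
      rw [PySem.List.mem_pyRange_one, PySem.List.len_eq]
      exact ⟨by positivity, by exact_mod_cast hjlt⟩
    have hget : PySem.List.pyGetD (pv_ds n) (j : Int) 0 = (pv_ds n)[j] :=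
      PySem.List.pyGetD_eq_getElem (pv_ds n) 0 (by positivity) (by exact_mod_cast hjlt)
    refine ⟨(j : Int), ?_, ?_⟩
    · rw [List.mem_filter]
      refine ⟨hjmem, ?_⟩
      simp only [decide_eq_true_eq]
      rw [hget, hdj]
      exact hdnz
    · rw [PySem.List.slice_to _ (by positivity), PySem.List.slice_from _ (by positivity)]
      rw [hget]
      have e1 : ((j : Int)).toNat = j := by omega
      have e2 : ((j : Int) + 1).toNat = j + 1 := by omega
      rw [e1, e2]
      rw [pv_mem_arrangements]
      refine ⟨L, ?_, by rw [hdj]; exact hval⟩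
      have hsplit : pv_ds n = (pv_ds n).take j ++ (pv_ds n)[j] :: (pv_ds n).drop (j + 1) := by
        conv_lhs => rw [← List.take_append_drop j (pv_ds n)]
        rw [List.getElem_cons_drop hjlt]
      have h2 := List.perm_middle (a := (pv_ds n)[j])
        (l₁ := (pv_ds n).take j) (l₂ := (pv_ds n).drop (j + 1))
      rw [← hsplit] at h2
      have h3 := hperm.trans h2
      rw [hdj] at h3
      exact h3.cons_inv

lemma pv_alt_eq (n : Int) (h : ¬ n < 0) :
    digit_permutations_alt n = PySem.List.sorted (PySem.Set.ofList (pv_collect n)) (fun x => x) := by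
  simp only [digit_permutations_alt, if_neg h]
  rfl

-- ===== VERDICT (by name: the statement is the Claim_ definition above) =====
theorem digit_permutations_spec : Claim_equal_digit_permutations := by
  intro n _
  unfold Spec_digit_permutations
  by_cases hneg : n < 0
  · have hA : digit_permutations n = [] := by
      unfold digit_permutations pv_factorial
      rw [PySem.List.pyRange_one_eq_nil (by omega)]
      simp only [List.foldl_nil]
      rw [pv_loop, dif_neg (fun h => absurd h.1 (by simp; omega))]
    rw [hA]
    unfold digit_permutations_alt
    rw [if_pos hneg]
  · by_cases h0 : n = 0
    · subst h0
      have hA : digit_permutations 0 = [] := by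
        unfold digit_permutations pv_factorial
        rw [PySem.List.pyRange_one_eq_nil (by norm_num)]
        simp only [List.foldl_nil]
        rw [pv_loop, dif_neg (fun h => absurd h.1 (by norm_num))]
      have hds : pv_ds 0 = [0] := by
        unfold pv_ds
        rw [pv_digits_loop, dif_neg (by norm_num)]
        simp
      have hcoll : pv_collect 0 = [] := by
        unfold pv_collect
        rw [hds]
        have hr : PySem.List.pyRange 0 (PySem.List.len ([(0:Int)])) = [0] := by
          rw [PySem.List.len_eq]
          decide
        rw [hr]
        simp only [List.foldl_cons, List.foldl_nil]
        rw [if_neg (by decide)]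
      have hB : digit_permutations_alt 0 = [] := by
        rw [pv_alt_eq 0 (by norm_num), hcoll]
        decide
      rw [hA, hB]
    · have hn1 : 1 ≤ n := by omega
      have hNne : n.toNat ≠ 0 := by omega
      have hDNnil : Nat.digits 10 n.toNat ≠ [] := Nat.digits_ne_nil_iff_ne_zero.mpr hNne
      have hl1 : 0 < (Nat.digits 10 n.toNat).length := List.length_pos_of_ne_nil hDNnil
      set l : ℕ := (Nat.digits 10 n.toNat).length with hldef
      have hlen : PySem.Str.len (PySem.Int.toStr n) = (l : Int) := by
        rw [PySem.Str.len_eq, PySem.Int.toList_toStr, pv_toChars_eq n (by omega)]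
        simp [hldef]
      have hexp1 : ((l : Int)).toNat = l := by omega
      have hexp2 : ((l : Int) - 1).toNat = l - 1 := by omega
      have hAeq : digit_permutations n =
          pv_loop n (pv_factorial n) ((10:Int) ^ l) [] ((10:Int) ^ (l - 1)) := by
        rw [show digit_permutations n = pv_loop n (pv_factorial n)
            ((10:Int) ^ (PySem.Str.len (PySem.Int.toStr n)).toNat) []
            ((10:Int) ^ ((PySem.Str.len (PySem.Int.toStr n)) - 1).toNat) from rfl]
        rw [hlen, hexp1, hexp2]
      have hnlb : (10:Int) ^ (l - 1) ≤ n := by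
        have h1 : ¬ ((Nat.digits 10 n.toNat).length ≤ l - 1) := by omega
        rw [Nat.digits_length_le_iff (by norm_num)] at h1
        push Not at h1
        have h3 : (((10:ℕ) ^ (l - 1) : ℕ) : Int) ≤ (n.toNat : Int) := by exact_mod_cast h1
        push_cast at h3
        omega
      have hnub : n < (10:Int) ^ l := by
        have h1 : n.toNat < 10 ^ l := Nat.lt_base_pow_length_digits (by norm_num)
        have h3 : ((n.toNat : ℕ) : Int) < (((10:ℕ) ^ l : ℕ) : Int) := by exact_mod_cast h1
        push_cast at h3
        omega
      set FA := pv_FA n ((10:Int) ^ (l - 1)) ((10:Int) ^ l) with hFAdef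
      have hFA_pairwise : FA.Pairwise (· < ·) :=
        List.Pairwise.filter _ (PySem.List.pairwise_lt_pyRange_one _ _)
      have hFA_nodup : FA.Nodup := hFA_pairwise.imp (fun h => ne_of_lt h)
      have hmemFA := pv_mem_FA n hn1
      have hcap : ((FA.length : Int)) ≤ pv_factorial n := by
        by_cases hl2 : 2 ≤ l
        · have h1 : FA.length ≤ (PySem.List.pyRange ((10:Int) ^ (l - 1)) ((10:Int) ^ l)).length :=
            List.length_filter_le _ _
          rw [PySem.List.length_pyRange_one] at h1
          have hple : (10:Int) ^ (l - 1) ≤ (10:Int) ^ l :=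
            pow_le_pow_right₀ (by norm_num) (by omega)
          have h3 : ((FA.length : Int)) ≤ (10:Int) ^ l - (10:Int) ^ (l - 1) := by
            calc ((FA.length : Int)) ≤ ((((10:Int) ^ l - (10:Int) ^ (l - 1)).toNat : ℕ) : Int) := by
                  exact_mod_cast h1
              _ = (10:Int) ^ l - (10:Int) ^ (l - 1) := Int.toNat_of_nonneg (by omega)
          have e : (10:Int) ^ l = (10:Int) ^ (l - 1) * 10 := by
            rw [← pow_succ]
            congr 1
            omega
          have hn10 : 10 ≤ n := by
            have : (10:Int) ^ 1 ≤ (10:Int) ^ (l - 1) :=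
              pow_le_pow_right₀ (by norm_num) (by omega)
            simpa using le_trans this hnlb
          have h2 := pv_factorial_ge n hn10
          nlinarith [pow_pos (show (0:Int) < 10 by norm_num) (l - 1)]
        · have hl1' : l = 1 := by omega
          have hNlt : n.toNat < 10 := by
            have h1 : n.toNat < 10 ^ l := Nat.lt_base_pow_length_digits (by norm_num)
            rw [hl1'] at h1
            simpa using h1
          have hDN1 : Nat.digits 10 n.toNat = [n.toNat] := Nat.digits_of_lt 10 n.toNat hNne hNlt
          have hFAn : FA = [n] := by
            rw [← List.perm_singleton]
            rw [List.perm_ext_iff_of_nodup hFA_nodup (by simp)]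
            intro v
            rw [hFAdef, hmemFA v]
            simp only [List.mem_singleton]
            constructor
            · rintro ⟨d, L, hperm, hdnz, hval⟩
              rw [hDN1] at hperm
              simp only [List.map_cons, List.map_nil] at hperm
              rw [List.perm_singleton, List.cons.injEq] at hperm
              obtain ⟨rfl, rfl⟩ := hperm
              rw [hval]
              unfold pv_horner
              simp only [List.foldl_nil, Int.ofNat_eq_natCast]
              omega
            · intro hveq
              refine ⟨Int.ofNat n.toNat, [], ?_, ?_, ?_⟩
              · rw [hDN1]
                simp
              · simp only [Int.ofNat_eq_natCast, ne_eq, Nat.cast_eq_zero]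
                omega
              · rw [hveq]
                unfold pv_horner
                simp only [List.foldl_nil, Int.ofNat_eq_natCast]
                omega
          rw [hFAn]
          have := pv_factorial_ge_self n hn1
          simp only [List.length_singleton]
          omega
      have hAFA : digit_permutations n = FA := by
        rw [hAeq]
        rw [pv_loop_eq n (pv_factorial n) ((10:Int) ^ l)
          ((10:Int) ^ l - (10:Int) ^ (l - 1)).toNat ((10:Int) ^ (l - 1)) [] rfl
          (by simpa using hcap)]
        simp [hFAdef, pv_FA]
      have hds : pv_ds n = (Nat.digits 10 n.toNat).map Int.ofNat := by
        unfold pv_ds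
        rw [pv_digits_loop_eq n (by omega) [], List.nil_append]
        rw [if_neg (by simp [hDNnil])]
      have hB : digit_permutations_alt n = FA := by
        rw [pv_alt_eq n hneg]
        apply PySem.List.sorted_eq_of_perm_of_pairwise_lt
        · rw [List.perm_ext_iff_of_nodup hFA_nodup (PySem.Set.nodup_ofList _)]
          intro v
          rw [PySem.Set.mem_ofList, pv_mem_result, hds, hFAdef, hmemFA v]
        · exact hFA_pairwise
      rw [hAFA, hB]
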